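-- pv_equiv track=rewrite | github.com/Arron-chenzm/common_test_new | analysis/bg1_analysis5.py | bg1_thing
-- ===== SOURCE A (Python) =====
-- def bg1_thing(str):
--     res = ""
--     length = len(str)
--     flag = 0
--     for i in range(0, length):
--         if str[i] != ":":
--             continue
--         elif str[i] == ":" and flag < 2:
--             flag = flag+1
--             continue
--         elif str[i] == ":" and flag == 2:
--             while (i<length-2 and str[i+1]!=' '):
--                 i = i + 1
--                 res = res + str[i]
--             break
--     return res
-- ===== SOURCE B (Python) =====
-- def bg1_thing(str):
--     p = str.find(':')
--     if p == -1:
--         return ""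
--     p = str.find(':', p + 1)
--     if p == -1:
--         return ""
--     p = str.find(':', p + 1)
--     if p == -1:
--         return ""
--     tail = str[p + 1:]
--     sp = tail.find(' ')
--     return tail if sp == -1 else tail[:sp]
-- ===== Notes on version B (the rewrite author's own statement) =====
-- stated objective: simpler
-- what changed: Replaced A's char-by-char colon-counting state machine (flag variable plus nested while accumulating one char at a time) by locating the third colon with three chained str.find calls and cutting the remaining suffix at its first space.
-- intended difference: On inputs where the third colon is followed by a nonempty suffix containing no space, A's inner loop bound i<length-2 silently drops the final character (e.g. ':::ab' gives 'a'); B returns the whole suffix 'ab', which is the intended chars-after-third-colon-until-space. — e.g. on bg1_thing(":::ab"): A returns "a", B returns "ab"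
import Mathlib
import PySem

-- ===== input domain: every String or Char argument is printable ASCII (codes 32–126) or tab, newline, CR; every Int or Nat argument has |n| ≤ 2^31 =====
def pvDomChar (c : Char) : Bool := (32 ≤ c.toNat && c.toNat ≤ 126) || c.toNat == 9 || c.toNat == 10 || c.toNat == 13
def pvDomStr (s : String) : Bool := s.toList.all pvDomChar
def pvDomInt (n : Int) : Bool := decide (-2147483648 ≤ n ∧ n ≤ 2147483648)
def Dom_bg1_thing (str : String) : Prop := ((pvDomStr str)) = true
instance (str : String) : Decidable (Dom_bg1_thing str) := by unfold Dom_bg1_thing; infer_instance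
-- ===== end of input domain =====

-- B replaces A's char-by-char colon-counting state machine by three chained find calls and one
-- slice cut at the first space; objective: simpler. Intended difference: where A's inner loop
-- bound drops the final character, B keeps it (see D_ below).

-- ===== PORT A =====
-- Inner while loop: 'while (i<length-2 and str[i+1]!=' '): i=i+1; res=res+str[i]'.
-- 'i < length-2' says at least two characters remain after position i, i.e. the suffix
-- after position i matches 'a :: b :: t'; 'str[i+1]' is 'a'; after 'i = i+1', 'str[i]' is 'a'.
def bg1Inner : List Char → List Char → List Char
  | a :: b :: t, res => if a != ' ' then bg1Inner (b :: t) (res ++ [a]) else res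
  | _, res => res

-- Outer for loop over i in range(0, length) reading str[i]: iteration over the suffix list,
-- with the same flag state and the same branch order ('continue' = recurse, 'break' = stop).
def bg1Outer (flag : Int) : List Char → List Char
  | [] => []
  | c :: rest =>
    if c != ':' then bg1Outer flag rest
    else if flag < 2 then bg1Outer (flag + 1) rest
    else if flag == 2 then bg1Inner rest []
    else bg1Outer flag rest

def bg1_thing (str : String) : String := String.ofList (bg1Outer 0 str.toList)

-- ===== PORT B =====
def bg1_thing_alt (str : String) : String :=
  let s := str.toList
  let p1 := PySem.Chars.find s [':']                       -- str.find(':')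
  if p1 = -1 then "" else
  let p2 := PySem.Chars.findFrom s [':'] (p1 + 1) none     -- str.find(':', p+1)
  if p2 = -1 then "" else
  let p3 := PySem.Chars.findFrom s [':'] (p2 + 1) none
  if p3 = -1 then "" else
  let tail := PySem.Chars.slice s (some (p3 + 1)) none     -- str[p+1:]
  let sp := PySem.Chars.find tail [' ']                    -- tail.find(' ')
  if sp = -1 then String.ofList tail else String.ofList (PySem.Chars.slice tail none (some sp))

-- ===== PRECONDITION & SPEC =====
-- helper for D_: the suffix after the first colon ([] if none) — input inspection only
def pvAfterColon (s : List Char) : List Char := (s.dropWhile (· != ':')).tail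

-- On inputs whose third colon is followed by a nonempty suffix containing no space, A's inner
-- loop bound i<length-2 drops the final character (':::ab' → 'a'); B returns the whole suffix
-- ('ab'), the intended chars-after-third-colon-until-space.
def D_bg1_thing (str : String) : Prop :=
  pvAfterColon (pvAfterColon (pvAfterColon str.toList)) ≠ [] ∧
  (' ' : Char) ∉ pvAfterColon (pvAfterColon (pvAfterColon str.toList))
instance (str : String) : Decidable (D_bg1_thing str) := by unfold D_bg1_thing; infer_instance

def Spec_bg1_thing (str : String) (out : String) : Prop := ¬ D_bg1_thing str → out = bg1_thing_alt str
instance (str : String) (out : String) : Decidable (Spec_bg1_thing str out) := by unfold Spec_bg1_thing; infer_instance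

def pvDiffWitness_bg1_thing : String := ":::ab"
def pvDiffWitnessOut_bg1_thing : String × String := ("a", "ab")

-- ===== CLAIM (what is proved, stated in full; the proofs are below) =====
def Claim_unchanged_bg1_thing : Prop := ∀ (str : String), Dom_bg1_thing str → Spec_bg1_thing str (bg1_thing str)
def Claim_changed_bg1_thing : Prop := Dom_bg1_thing (pvDiffWitness_bg1_thing) ∧ D_bg1_thing (pvDiffWitness_bg1_thing) ∧ bg1_thing (pvDiffWitness_bg1_thing) = pvDiffWitnessOut_bg1_thing.1 ∧ bg1_thing_alt (pvDiffWitness_bg1_thing) = pvDiffWitnessOut_bg1_thing.2 ∧ pvDiffWitnessOut_bg1_thing.1 ≠ pvDiffWitnessOut_bg1_thing.2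
def Claim_exact_bg1_thing : Prop := ∀ (str : String), Dom_bg1_thing str → D_bg1_thing str → bg1_thing str ≠ bg1_thing_alt str

-- ===== LEMMAS AND PROOFS =====

-- decomposition at the first occurrence of a character
lemma firstSplit {c : Char} {s : List Char} (h : c ∈ s) :
    ∃ u v, s = u ++ c :: v ∧ c ∉ u := by
  induction s with
  | nil => cases h
  | cons a t ih =>
    by_cases hac : a = c
    · exact ⟨[], t, by simp [hac], by simp⟩
    · have ht : c ∈ t := by
        rcases List.mem_cons.mp h with h | h
        · exact absurd h.symm hac
        · exact h
      rcases ih ht with ⟨u, v, rfl, hu⟩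
      exact ⟨a :: u, v, rfl, by simp [hu, Ne.symm hac]⟩

lemma bg1Inner_eq (l res : List Char) :
    bg1Inner l res = res ++ (l.dropLast.takeWhile (· != ' ')) := by
  induction l generalizing res with
  | nil => simp [bg1Inner]
  | cons a t ih =>
    cases t with
    | nil => simp [bg1Inner]
    | cons b t2 =>
      rw [bg1Inner]
      by_cases ha : (a != ' ') = true
      · rw [if_pos ha, ih, List.dropLast_cons₂, List.takeWhile_cons, ha]
        simp
      · rw [if_neg ha, List.dropLast_cons₂, List.takeWhile_cons]
        simp only [Bool.not_eq_true] at ha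
        rw [ha]
        simp

lemma bg1Outer_noColon (f : Int) (s : List Char) (h : (':' : Char) ∉ s) :
    bg1Outer f s = [] := by
  induction s with
  | nil => rfl
  | cons a t ih =>
    simp only [List.mem_cons, not_or] at h
    have ha : (a != ':') = true := bne_iff_ne.mpr (Ne.symm h.1)
    rw [bg1Outer, if_pos ha]
    exact ih h.2

lemma bg1Outer_colon (f : Int) (u v : List Char) (hu : (':' : Char) ∉ u) :
    bg1Outer f (u ++ ':' :: v) =
      (if f < 2 then bg1Outer (f + 1) v else if f == 2 then bg1Inner v [] else bg1Outer f v) := by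
  induction u with
  | nil => rw [List.nil_append, bg1Outer]; simp
  | cons a t ih =>
    simp only [List.mem_cons, not_or] at hu
    have ha : (a != ':') = true := bne_iff_ne.mpr (Ne.symm hu.1)
    rw [List.cons_append, bg1Outer, if_pos ha]
    exact ih hu.2

lemma find_single {c : Char} (u v : List Char) (hu : c ∉ u) :
    PySem.Chars.find (u ++ c :: v) [c] = (u.length : Int) := by
  have hinf : [c] <:+: (u ++ c :: v) := ⟨u, v, by simp⟩
  have hnn : 0 ≤ PySem.Chars.find (u ++ c :: v) [c] :=
    (PySem.Chars.find_nonneg_iff _ _).mpr hinf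
  obtain ⟨hpre, hmin⟩ := PySem.Chars.find_spec hnn
  set n := (PySem.Chars.find (u ++ c :: v) [c]).toNat with hn
  have hdropu : (u ++ c :: v).drop u.length = c :: v := by
    simp
  have hle : n ≤ u.length := by
    by_contra hgt
    exact hmin u.length (by omega) (by rw [hdropu]; exact ⟨v, rfl⟩)
  have hnot : ¬ n < u.length := by
    intro hlt
    obtain ⟨t, ht⟩ := hpre
    have hhead : (u ++ c :: v)[n]? = some c := by
      have : ((u ++ c :: v).drop n)[0]? = some c := by rw [← ht]; rfl
      simpa [List.getElem?_drop] using this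
    have : u[n]? = some c := by
      rwa [List.getElem?_append_left hlt] at hhead
    exact hu (List.mem_of_getElem? this)
  omega

lemma find_single_neg {c : Char} (s : List Char) (h : c ∉ s) :
    PySem.Chars.find s [c] = -1 := by
  rw [PySem.Chars.find_eq_neg_one_iff]
  intro hinf
  exact h (hinf.mem (by simp))

lemma findFrom_after (s pre suf : List Char) (c : Char) (h : s = pre ++ suf) :
    PySem.Chars.findFrom s [c] (pre.length : Int) none =
      (if PySem.Chars.find suf [c] = -1 then -1
       else (pre.length : Int) + PySem.Chars.find suf [c]) := by
  have hk : pre.length ≤ s.length := by simp [h]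
  rw [PySem.Chars.findFrom_natCast s [c] pre.length hk]
  have hdrop : s.drop pre.length = suf := by
    rw [h]; simp
  rw [hdrop]

lemma takeWhile_all {c : Char} (l : List Char) (h : c ∉ l) :
    l.takeWhile (· != c) = l := by
  induction l with
  | nil => rfl
  | cons a t ih =>
    simp only [List.mem_cons, not_or] at h
    simp [bne_iff_ne, Ne.symm h.1, ih h.2]

lemma takeWhile_split {c : Char} (w z : List Char) (hw : c ∉ w) :
    (w ++ c :: z).takeWhile (· != c) = w := by
  induction w with
  | nil => simp
  | cons a t ih =>
    simp only [List.mem_cons, not_or] at hw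
    simp [bne_iff_ne, Ne.symm hw.1, ih hw.2]

-- evaluation of A's port at a third-colon decomposition
lemma bg1A_eval (u1 u2 u3 v : List Char)
    (h1 : (':' : Char) ∉ u1) (h2 : (':' : Char) ∉ u2) (h3 : (':' : Char) ∉ u3) :
    bg1Outer 0 (u1 ++ ':' :: (u2 ++ ':' :: (u3 ++ ':' :: v)))
      = v.dropLast.takeWhile (· != ' ') := by
  rw [bg1Outer_colon 0 u1 _ h1, if_pos (by norm_num), show (0:Int)+1 = 1 from by norm_num,
    bg1Outer_colon 1 u2 _ h2, if_pos (by norm_num), show (1:Int)+1 = 2 from by norm_num,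
    bg1Outer_colon 2 u3 _ h3, if_neg (by norm_num), if_pos (by norm_num),
    bg1Inner_eq, List.nil_append]

-- evaluation of B's port at a third-colon decomposition
lemma bg1B_eval (str : String) (u1 u2 u3 v : List Char)
    (hs : str.toList = u1 ++ ':' :: (u2 ++ ':' :: (u3 ++ ':' :: v)))
    (h1 : (':' : Char) ∉ u1) (h2 : (':' : Char) ∉ u2) (h3 : (':' : Char) ∉ u3) :
    bg1_thing_alt str = String.ofList (v.takeWhile (· != ' ')) := by
  unfold bg1_thing_alt
  dsimp only
  set s := str.toList with hs0
  rw [hs, find_single u1 _ h1, if_neg (by omega)]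
  have hpre1 : (u1.length : Int) + 1 = ((u1 ++ [':']).length : Int) := by simp
  rw [hpre1, ← hs, findFrom_after s (u1 ++ [':']) (u2 ++ ':' :: (u3 ++ ':' :: v)) ':' (by rw [hs]; simp),
    find_single u2 _ h2, if_neg (show ¬((u2.length : Int) = -1) by omega),
    if_neg (show ¬(((u1 ++ [':']).length : Int) + (u2.length : Int) = -1) by omega)]
  have hpre2 : ((u1 ++ [':']).length : Int) + (u2.length : Int) + 1
      = ((u1 ++ ':' :: u2 ++ [':']).length : Int) := by simp; ring
  rw [hpre2, findFrom_after s (u1 ++ ':' :: u2 ++ [':']) (u3 ++ ':' :: v) ':' (by rw [hs]; simp),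
    find_single u3 _ h3, if_neg (show ¬((u3.length : Int) = -1) by omega),
    if_neg (show ¬(((u1 ++ ':' :: u2 ++ [':']).length : Int) + (u3.length : Int) = -1) by omega)]
  set m := (u1 ++ ':' :: u2 ++ ':' :: u3 ++ [':']).length with hm
  have hidx : ((u1 ++ ':' :: u2 ++ [':']).length : Int) + (u3.length : Int) + 1 = (m : Int) := by
    rw [hm]; simp; ring
  have hslice : PySem.Chars.slice s (some ((m : Int))) none = v := by
    rw [PySem.Chars.slice_eq_listSlice, PySem.List.slice_from s (by omega)]
    rw [Int.toNat_natCast]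
    rw [hs, hm]
    have : u1 ++ ':' :: (u2 ++ ':' :: (u3 ++ ':' :: v))
        = (u1 ++ ':' :: u2 ++ ':' :: u3 ++ [':']) ++ v := by simp
    rw [this]
    exact List.drop_left
  rw [hidx, hslice]
  by_cases h4 : (' ' : Char) ∈ v
  case neg =>
    rw [find_single_neg _ h4, if_pos rfl, takeWhile_all _ h4]
  case pos =>
  obtain ⟨w, z, hw, hw'⟩ := firstSplit h4
  rw [hw, find_single w z hw', if_neg (show ¬((w.length : Int) = -1) by omega),
    takeWhile_split w z hw']
  have hsl : PySem.Chars.slice (w ++ ' ' :: z) none (some ((w.length : Int))) = w := by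
    rw [PySem.Chars.slice_eq_listSlice, PySem.List.slice_to_natCast]
    exact List.take_left
  rw [hsl]

lemma pvAfterColon_split (u v : List Char) (hu : (':' : Char) ∉ u) :
    pvAfterColon (u ++ ':' :: v) = v := by
  unfold pvAfterColon
  induction u with
  | nil => simp
  | cons a t ih =>
    simp only [List.mem_cons, not_or] at hu
    rw [List.cons_append, List.dropWhile_cons, if_pos (bne_iff_ne.mpr (Ne.symm hu.1))]
    exact ih hu.2

lemma pvAfterColon_none (s : List Char) (h : (':' : Char) ∉ s) :
    pvAfterColon s = [] := by
  unfold pvAfterColon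
  induction s with
  | nil => rfl
  | cons a t ih =>
    simp only [List.mem_cons, not_or] at h
    rw [List.dropWhile_cons, if_pos (bne_iff_ne.mpr (Ne.symm h.1))]
    exact ih h.2

-- outside D_ the two takeWhile values coincide
lemma tw_eq (v : List Char) (h : v = [] ∨ (' ' : Char) ∈ v) :
    v.dropLast.takeWhile (· != ' ') = v.takeWhile (· != ' ') := by
  rcases h with rfl | hmem
  · rfl
  · obtain ⟨w, z, rfl, hw⟩ := firstSplit hmem
    rw [takeWhile_split w z hw]
    cases z with
    | nil =>
      have : (w ++ [' ']).dropLast = w := by simp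
      rw [this, takeWhile_all w hw]
    | cons b t =>
      have : (w ++ ' ' :: b :: t).dropLast = w ++ ' ' :: (b :: t).dropLast := by
        rw [List.dropLast_append_cons, List.dropLast_cons₂]
      rw [this, takeWhile_split w _ hw]

lemma ofList_inj (l1 l2 : List Char) (h : String.ofList l1 = String.ofList l2) : l1 = l2 := by
  have := congrArg String.toList h
  simpa using this

-- ===== VERDICT (by name: the statements are the Claim_ definitions above) =====
theorem bg1_thing_spec : Claim_unchanged_bg1_thing := by
  intro str _ hD
  show bg1_thing str = bg1_thing_alt str
  by_cases h1 : (':' : Char) ∈ str.toList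
  case neg =>
    unfold bg1_thing bg1_thing_alt
    dsimp only
    rw [find_single_neg _ h1, if_pos rfl, bg1Outer_noColon 0 _ h1]
  case pos =>
  obtain ⟨u1, v1, hs1, hu1⟩ := firstSplit h1
  by_cases h2 : (':' : Char) ∈ v1
  case neg =>
    unfold bg1_thing bg1_thing_alt
    dsimp only
    rw [hs1, find_single u1 v1 hu1, if_neg (by omega)]
    have hpre1 : (u1.length : Int) + 1 = ((u1 ++ [':']).length : Int) := by simp
    rw [hpre1, findFrom_after _ (u1 ++ [':']) v1 ':' (by simp),
      find_single_neg v1 h2, if_pos rfl, if_pos rfl, bg1Outer_colon 0 u1 v1 hu1,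
      if_pos (by norm_num), show (0:Int)+1 = 1 from by norm_num, bg1Outer_noColon 1 v1 h2]
  case pos =>
  obtain ⟨u2, v2, hv1, hu2⟩ := firstSplit h2
  by_cases h3 : (':' : Char) ∈ v2
  case neg =>
    unfold bg1_thing bg1_thing_alt
    dsimp only
    rw [hs1, hv1, find_single u1 _ hu1, if_neg (by omega)]
    have hpre1 : (u1.length : Int) + 1 = ((u1 ++ [':']).length : Int) := by simp
    rw [hpre1, findFrom_after _ (u1 ++ [':']) (u2 ++ ':' :: v2) ':' (by simp),
      find_single u2 v2 hu2, if_neg (show ¬((u2.length : Int) = -1) by omega),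
      if_neg (show ¬(((u1 ++ [':']).length : Int) + (u2.length : Int) = -1) by omega)]
    have hpre2 : ((u1 ++ [':']).length : Int) + (u2.length : Int) + 1
        = ((u1 ++ ':' :: u2 ++ [':']).length : Int) := by simp; ring
    rw [hpre2, findFrom_after _ (u1 ++ ':' :: u2 ++ [':']) v2 ':' (by simp),
      find_single_neg v2 h3, if_pos rfl, if_pos rfl,
      bg1Outer_colon 0 u1 _ hu1, if_pos (by norm_num), show (0:Int)+1 = 1 from by norm_num,
      bg1Outer_colon 1 u2 v2 hu2, if_pos (by norm_num), show (1:Int)+1 = 2 from by norm_num,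
      bg1Outer_noColon 2 v2 h3]
  case pos =>
  obtain ⟨u3, v3, hv2, hu3⟩ := firstSplit h3
  have hs : str.toList = u1 ++ ':' :: (u2 ++ ':' :: (u3 ++ ':' :: v3)) := by
    rw [hs1, hv1, hv2]
  have ha3 : pvAfterColon (pvAfterColon (pvAfterColon str.toList)) = v3 := by
    rw [hs, pvAfterColon_split u1 _ hu1, pvAfterColon_split u2 _ hu2,
      pvAfterColon_split u3 _ hu3]
  have hv3 : v3 = [] ∨ (' ' : Char) ∈ v3 := by
    unfold D_bg1_thing at hD
    rw [ha3] at hD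
    by_cases he : v3 = []
    · exact Or.inl he
    · right
      by_contra hsp
      exact hD ⟨he, hsp⟩
  rw [bg1B_eval str u1 u2 u3 v3 hs hu1 hu2 hu3]
  unfold bg1_thing
  rw [hs, bg1A_eval u1 u2 u3 v3 hu1 hu2 hu3, tw_eq v3 hv3]

theorem bg1_thing_changed : Claim_changed_bg1_thing := by
  unfold Claim_changed_bg1_thing
  decide

theorem bg1_thing_tight : Claim_exact_bg1_thing := by
  intro str _ hD heq
  obtain ⟨hne, hsp⟩ := hD
  by_cases h1 : (':' : Char) ∈ str.toList
  case neg =>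
    exact hne (by rw [pvAfterColon_none _ h1]; rfl)
  obtain ⟨u1, v1, hs1, hu1⟩ := firstSplit h1
  rw [hs1, pvAfterColon_split u1 v1 hu1] at hne hsp
  by_cases h2 : (':' : Char) ∈ v1
  case neg =>
    exact hne (by rw [pvAfterColon_none _ h2]; rfl)
  obtain ⟨u2, v2, hv1, hu2⟩ := firstSplit h2
  rw [hv1, pvAfterColon_split u2 v2 hu2] at hne hsp
  by_cases h3 : (':' : Char) ∈ v2
  case neg =>
    rw [pvAfterColon_none _ h3] at hne
    exact hne rfl
  obtain ⟨u3, v3, hv2, hu3⟩ := firstSplit h3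
  rw [hv2, pvAfterColon_split u3 v3 hu3] at hne hsp
  have hs : str.toList = u1 ++ ':' :: (u2 ++ ':' :: (u3 ++ ':' :: v3)) := by
    rw [hs1, hv1, hv2]
  rw [bg1B_eval str u1 u2 u3 v3 hs hu1 hu2 hu3] at heq
  unfold bg1_thing at heq
  rw [hs, bg1A_eval u1 u2 u3 v3 hu1 hu2 hu3] at heq
  have hdl : (' ' : Char) ∉ v3.dropLast := fun h => hsp (List.dropLast_subset v3 h)
  rw [takeWhile_all _ hdl, takeWhile_all _ hsp] at heq
  have := ofList_inj _ _ heq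
  have hlen := congrArg List.length this
  rw [List.length_dropLast] at hlen
  have : 0 < v3.length := List.length_pos_of_ne_nil hne
  omega
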